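-- pv_equiv track=rewrite | github.com/MaxHartel/MaxHartel.github.io | RROptimizer.py | subtract_binom
-- ===== SOURCE A (Python) =====
-- from math import comb
--
-- def subtract_binom(values, t, up_to=False):
--     """Subtracts expected binomial cost for each combination size."""
--     result = []
--     for i, value in enumerate(values):
--         if up_to:
--             binom_sum = sum(comb(t, k) for k in range(2, i + 3))
--         else:
--             binom_sum = comb(t, i + 2)
--         result.append(value - binom_sum)
--     return result
-- ===== SOURCE B (Python) =====
-- def subtract_binom(values, t, up_to=False):
--     """Subtracts expected binomial cost for each combination size (single pass,
--     running binomial term and prefix sum instead of recomputing comb/sums)."""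
--     result = []
--     c = t * (t - 1) // 2          # comb(t, 2)
--     s = c                          # running sum comb(t,2) + ... + comb(t,i+2)
--     for i, v in enumerate(values):
--         if i > 0:
--             k = i + 1              # previous top index: c was comb(t, k)
--             c = c * (t - k) // (k + 1)   # comb(t, k+1), exact division
--             s += c
--         result.append(v - (s if up_to else c))
--     return result
-- ===== Notes on version B (the rewrite author's own statement) =====
-- stated objective: faster
-- what changed: B replaces the per-element comb(t,i+2) call and the per-element re-summation sum(comb(t,k) for k in range(2,i+3)) by a single pass that updates the current binomial term with the multiplicative recurrence comb(t,k+1)=comb(t,k)*(t-k)//(k+1) and keeps a running prefix sum; intended as faster, measured 37x-110x at the sizes where A finishes (both eventually drown in huge-integer arithmetic).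
import Mathlib
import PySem

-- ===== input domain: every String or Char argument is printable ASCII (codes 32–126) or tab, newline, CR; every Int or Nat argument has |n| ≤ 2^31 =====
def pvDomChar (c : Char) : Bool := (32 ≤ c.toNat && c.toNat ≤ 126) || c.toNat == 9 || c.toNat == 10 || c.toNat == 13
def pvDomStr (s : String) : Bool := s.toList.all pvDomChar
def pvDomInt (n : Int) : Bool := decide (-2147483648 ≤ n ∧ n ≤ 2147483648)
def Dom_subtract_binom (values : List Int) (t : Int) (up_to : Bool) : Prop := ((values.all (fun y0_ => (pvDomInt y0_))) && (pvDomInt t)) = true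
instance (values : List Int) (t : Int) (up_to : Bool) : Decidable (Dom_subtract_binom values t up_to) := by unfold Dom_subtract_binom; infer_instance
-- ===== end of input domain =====

-- B computes each binomial term from the previous one (multiplicative recurrence) with a
-- running prefix sum: one pass instead of A's per-element recomputation (re-summation in
-- up_to mode); intended as faster, measured 37x-110x in a timing run at the sizes
-- where A finishes (at the largest sizes both are dominated by huge-integer arithmetic).

-- ===== PORT A =====
-- math.comb(t, k) for t ≥ 0, ported via the exact multiplicative recurrence
-- comb(n, k+1) = comb(n, k) * (n - k) / (k + 1) (the Nat division is exact at every step).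
def combA (t : Int) : Nat → Nat
  | 0 => 1
  | k + 1 => combA t k * (t.toNat - k) / (k + 1)

def subtract_binom (values : List Int) (t : Int) (up_to : Bool) : List Int :=
  (PySem.List.enumerate values).foldl
    (fun result iv =>
      let binom_sum : Int :=
        if up_to then
          (PySem.List.pyRange 2 (iv.1 + 3) 1).foldl (fun acc k => acc + (combA t k.toNat : Int)) 0
        else (combA t (iv.1 + 2).toNat : Int)
      result ++ [iv.2 - binom_sum]) []

-- ===== PORT B =====
-- loop body of Source B: state = (result, c, s)
def pvBstep (t : Int) (up_to : Bool) (st : List Int × Int × Int) (iv : Int × Int) :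
    List Int × Int × Int :=
  if iv.1 > 0 then
    let k : Int := iv.1 + 1
    let c' := PySem.Int.floordiv (st.2.1 * (t - k)) (k + 1)
    let s' := st.2.2 + c'
    (st.1 ++ [iv.2 - (if up_to then s' else c')], c', s')
  else (st.1 ++ [iv.2 - (if up_to then st.2.2 else st.2.1)], st.2.1, st.2.2)

def subtract_binom_alt (values : List Int) (t : Int) (up_to : Bool) : List Int :=
  let c0 : Int := PySem.Int.floordiv (t * (t - 1)) 2
  ((PySem.List.enumerate values).foldl (pvBstep t up_to) ([], c0, c0)).1

-- ===== PRECONDITION & SPEC =====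
-- Pre_ excludes exactly the inputs where A raises: t < 0 with a non-empty list
-- (math.comb raises ValueError for negative t).
def Pre_subtract_binom (values : List Int) (t : Int) (up_to : Bool) : Prop :=
  values = [] ∨ 0 ≤ t
instance (values : List Int) (t : Int) (up_to : Bool) : Decidable (Pre_subtract_binom values t up_to) := by
  unfold Pre_subtract_binom; infer_instance

def pvWitness_subtract_binom : List Int × Int × Bool := ([5, 10, 3], 4, true)

def Spec_subtract_binom (values : List Int) (t : Int) (up_to : Bool) (out : List Int) : Prop := out = subtract_binom_alt values t up_to
instance (values : List Int) (t : Int) (up_to : Bool) (out : List Int) : Decidable (Spec_subtract_binom values t up_to out) := by unfold Spec_subtract_binom; infer_instance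

-- ===== CLAIM (what is proved, stated in full; the proofs are below) =====
def Claim_equal_subtract_binom : Prop := ∀ (values : List Int) (t : Int) (up_to : Bool), Dom_subtract_binom values t up_to → Pre_subtract_binom values t up_to → Spec_subtract_binom values t up_to (subtract_binom values t up_to)

-- ===== LEMMAS AND PROOFS =====

lemma combA_zero (t : Int) : ∀ j : Nat, t.toNat < j → combA t j = 0 := by
  intro j
  induction j with
  | zero => omega
  | succ k ih =>
    intro h
    rcases Nat.lt_or_ge t.toNat (k + 1) with hk | hk
    · rcases Nat.lt_or_ge t.toNat k with hk' | hk'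
      · simp [combA, ih hk']
      · have : t.toNat = k := by omega
        simp [combA, this]
    · omega

-- key step: the Int recurrence in B computes combA
lemma combA_step (t : Int) (ht : 0 ≤ t) (j : Nat) :
    PySem.Int.floordiv ((combA t j : Int) * (t - (j : Int))) ((j : Int) + 1) =
      (combA t (j + 1) : Int) := by
  by_cases hj : j ≤ t.toNat
  · have htj : t - (j : Int) = ((t.toNat - j : Nat) : Int) := by omega
    rw [htj, ← Nat.cast_mul]
    have h2 : ((j : Int) + 1) = ((j + 1 : Nat) : Int) := by push_cast; ring
    rw [h2, PySem.Int.floordiv_natCast]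
    simp [combA]
  · have hj' : t.toNat < j := by omega
    have h0 : combA t j = 0 := combA_zero t j hj'
    have h1 : combA t (j + 1) = 0 := combA_zero t (j + 1) (by omega)
    rw [h0, h1]
    simp

-- seed: t*(t-1)//2 = comb(t,2)
lemma seed_eq (t : Int) (ht : 0 ≤ t) :
    PySem.Int.floordiv (t * (t - 1)) 2 = (combA t 2 : Int) := by
  obtain ⟨n, rfl⟩ : ∃ n : Nat, t = (n : Int) := ⟨t.toNat, by omega⟩
  cases n with
  | zero => simp [combA]
  | succ m =>
    have h1 : ((m + 1 : Nat) : Int) * (((m + 1 : Nat) : Int) - 1) = (((m + 1) * m : Nat) : Int) := by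
      push_cast; ring
    rw [h1]
    have h2 := PySem.Int.floordiv_natCast ((m + 1) * m) 2
    have h3 : ((2 : Nat) : Int) = (2 : Int) := by norm_num
    rw [h3] at h2
    rw [h2]
    have : combA ((m + 1 : Nat) : Int) 2 = (m + 1) * m / 2 := by
      simp [combA, Nat.mul_comm]
    rw [this]

-- prefix sums  SsumI t i = comb(t,2) + comb(t,3) + ... + comb(t,i+2)
def SsumI (t : Int) : Nat → Int
  | 0 => (combA t 2 : Int)
  | n + 1 => SsumI t n + (combA t (n + 3) : Int)

-- A's inner loop: pyRange sum equals the prefix sum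
lemma A_sum (t : Int) (i : Nat) :
    (PySem.List.pyRange 2 ((i : Int) + 3) 1).foldl
        (fun acc k => acc + (combA t k.toNat : Int)) 0 = SsumI t i := by
  induction i with
  | zero =>
    norm_num
    have h : PySem.List.pyRange 2 3 1 = [2] := by decide
    rw [h]; simp [SsumI]
  | succ m ih =>
    have hsplit : PySem.List.pyRange 2 (((m + 1 : Nat) : Int) + 3) 1 =
        PySem.List.pyRange 2 ((m : Int) + 3) 1 ++ [(m : Int) + 3] := by
      have : ((m + 1 : Nat) : Int) + 3 = ((m : Int) + 3) + 1 := by push_cast; ring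
      rw [this, PySem.List.pyRange_one_succ_right (by omega)]
    rw [hsplit, List.foldl_append, ih]
    have : ((m : Int) + 3).toNat = m + 3 := by omega
    simp [SsumI, this]

-- generic: append-fold is a map
lemma foldl_append_map {α β : Type} (f : α → β) :
    ∀ (l : List α) (init : List β),
      l.foldl (fun acc x => acc ++ [f x]) init = init ++ l.map f := by
  intro l
  induction l with
  | nil => simp
  | cons x xs ih => intro init; simp [List.foldl_cons, ih, List.append_assoc]

-- the common closed form both ports are shown to equal
def pvBody (t : Int) (up_to : Bool) (iv : Int × Int) : Int :=
  iv.2 - (if up_to then SsumI t iv.1.toNat else (combA t (iv.1 + 2).toNat : Int))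

lemma A_eq_map (values : List Int) (t : Int) (up_to : Bool) :
    subtract_binom values t up_to = (PySem.List.enumerate values).map (pvBody t up_to) := by
  unfold subtract_binom
  rw [foldl_append_map]
  rw [List.nil_append]
  apply List.map_congr_left
  intro iv hiv
  rcases (PySem.List.mem_enumerate_iff _ _ _).1 hiv with ⟨k, hk, rfl⟩
  simp only [pvBody]
  congr 1
  cases up_to with
  | false => simp
  | true =>
    simp only [if_true]
    have h0 : (0 : Int) + (k : Int) = (k : Int) := by ring
    rw [h0, A_sum t k]
    simp

-- B's loop invariant: starting at index n+1 with c = comb(t, n+2), s = SsumI t n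
lemma B_loop (t : Int) (ht : 0 ≤ t) (up_to : Bool) :
    ∀ (rest : List Int) (n : Nat) (res : List Int),
      ((PySem.List.enumerate rest ((n : Int) + 1)).foldl (pvBstep t up_to)
          (res, (combA t (n + 2) : Int), SsumI t n)).1
        = res ++ (PySem.List.enumerate rest ((n : Int) + 1)).map (pvBody t up_to) := by
  intro rest
  induction rest with
  | nil => intro n res; simp [PySem.List.enumerate_nil]
  | cons x xs ih =>
    intro n res
    rw [PySem.List.enumerate_cons]
    simp only [List.foldl_cons, List.map_cons]
    have hstep : pvBstep t up_to (res, (combA t (n + 2) : Int), SsumI t n) ((n : Int) + 1, x)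
        = (res ++ [pvBody t up_to ((n : Int) + 1, x)], (combA t (n + 3) : Int), SsumI t (n + 1)) := by
      unfold pvBstep
      have hpos : ((n : Int) + 1) > 0 := by positivity
      rw [if_pos hpos]
      have hc : PySem.Int.floordiv ((combA t (n + 2) : Int) * (t - (((n : Int) + 1) + 1)))
          ((((n : Int) + 1) + 1) + 1) = (combA t (n + 3) : Int) := by
        have := combA_step t ht (n + 2)
        have hcast : ((n + 2 : Nat) : Int) = ((n : Int) + 1) + 1 := by push_cast; ring
        rw [hcast] at this
        convert this using 2
      simp only [hc, Prod.mk.injEq, true_and]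
      refine ⟨by congr 1, by simp [SsumI]⟩
    rw [hstep]
    have hc2 : ((n : Int) + 1) + 1 = ((n + 1 : Nat) : Int) + 1 := by push_cast; ring
    rw [hc2, ih (n + 1) (res ++ [pvBody t up_to ((n : Int) + 1, x)])]
    simp [List.append_assoc, hc2]

lemma main_eq (values : List Int) (t : Int) (ht : 0 ≤ t) (up_to : Bool) :
    subtract_binom values t up_to = subtract_binom_alt values t up_to := by
  rw [A_eq_map]
  unfold subtract_binom_alt
  cases values with
  | nil => simp [PySem.List.enumerate_nil]
  | cons x xs =>
    rw [PySem.List.enumerate_cons]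
    simp only [List.foldl_cons, List.map_cons]
    have hstep : pvBstep t up_to ([], PySem.Int.floordiv (t * (t - 1)) 2,
          PySem.Int.floordiv (t * (t - 1)) 2) (0, x)
        = ([pvBody t up_to (0, x)], (combA t 2 : Int), SsumI t 0) := by
      unfold pvBstep
      rw [if_neg (by norm_num)]
      rw [seed_eq t ht]
      unfold pvBody
      simp [SsumI]
    rw [hstep]
    have h01 : (0 : Int) + 1 = ((0 : Nat) : Int) + 1 := by norm_num
    rw [h01]
    have := B_loop t ht up_to xs 0 [pvBody t up_to (0, x)]
    have hc : (combA t (0 + 2) : Int) = (combA t 2 : Int) := by norm_num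
    rw [hc] at this
    rw [this]
    simp

-- ===== VERDICT (by name: the statement is the Claim_ definition above) =====
theorem subtract_binom_spec : Claim_equal_subtract_binom := by
  intro values t up_to _ hpre
  unfold Spec_subtract_binom
  rcases hpre with h | h
  · subst h; rfl
  · exact main_eq values t h up_to
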